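-- pv_equiv track=rewrite | github.com/diegogerwig/advent_of_code | 2024/12/advent_2024_12.py | calc_segment_overlaps
-- ===== SOURCE A (Python) =====
-- def calc_segment_overlaps(segments1, segments2):
--     """
--     Calculates overlapping sides between segments in adjacent rows
--     Returns total number of overlapping edges
--     """
--     overlaps = 0
--     for seg1 in segments1:
--         for seg2 in segments2:
--             if seg1[0] == seg2[0] and seg1[1] == seg2[1]:
--                 overlaps += 4  # Complete overlap
--             elif seg1[0] == seg2[0]:
--                 overlaps += 2  # Start point overlap
--             elif seg1[1] == seg2[1]:
--                 overlaps += 2  # End point overlap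
--     return overlaps
-- ===== SOURCE B (Python) =====
-- def calc_segment_overlaps(segments1, segments2):
--     first_counts = {}
--     second_counts = {}
--     for a, b in segments2:
--         first_counts[a] = first_counts.get(a, 0) + 1
--         second_counts[b] = second_counts.get(b, 0) + 1
--     overlaps = 0
--     for a, b in segments1:
--         overlaps += 2 * (first_counts.get(a, 0) + second_counts.get(b, 0))
--     return overlaps
-- ===== Notes on version B (the rewrite author's own statement) =====
-- stated objective: faster
-- what changed: Replaced the nested pairwise scan by hash counters of segments2's first and second coordinates built once, then a single pass over segments1 summing 2*(first_count+second_count), using that each pair contributes 2 per matching coordinate.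
import Mathlib
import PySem

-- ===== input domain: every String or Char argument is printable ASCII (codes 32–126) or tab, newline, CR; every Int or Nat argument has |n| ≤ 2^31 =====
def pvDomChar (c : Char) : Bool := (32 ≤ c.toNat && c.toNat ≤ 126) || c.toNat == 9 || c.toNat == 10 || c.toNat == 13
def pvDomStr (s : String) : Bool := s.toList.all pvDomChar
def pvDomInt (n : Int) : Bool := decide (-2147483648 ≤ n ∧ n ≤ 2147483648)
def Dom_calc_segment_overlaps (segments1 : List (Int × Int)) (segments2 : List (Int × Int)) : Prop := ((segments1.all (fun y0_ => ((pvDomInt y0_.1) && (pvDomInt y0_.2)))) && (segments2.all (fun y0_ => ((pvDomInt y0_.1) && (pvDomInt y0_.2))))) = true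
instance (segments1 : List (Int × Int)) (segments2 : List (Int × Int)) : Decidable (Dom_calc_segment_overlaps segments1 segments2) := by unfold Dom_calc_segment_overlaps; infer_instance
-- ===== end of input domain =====

-- B replaces A's O(n*m) nested pairwise scan by counters of segments2's first/second
-- coordinates built once plus one pass over segments1 (O(n+m)); same return value.

-- ===== PORT A =====
def calc_segment_overlaps (segments1 : List (Int × Int)) (segments2 : List (Int × Int)) : Int :=
  segments1.foldl (fun overlaps seg1 =>
    segments2.foldl (fun overlaps seg2 =>
      if seg1.1 == seg2.1 && seg1.2 == seg2.2 then overlaps + 4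
      else if seg1.1 == seg2.1 then overlaps + 2
      else if seg1.2 == seg2.2 then overlaps + 2
      else overlaps) overlaps) 0

-- ===== PORT B =====
def calc_segment_overlaps_alt (segments1 : List (Int × Int)) (segments2 : List (Int × Int)) : Int :=
  -- first loop of Source B: build both counters over segments2
  let counts := segments2.foldl
    (fun (cs : PySem.Dict Int Int × PySem.Dict Int Int) p =>
      (cs.1.insert p.1 (cs.1.getD p.1 0 + 1), cs.2.insert p.2 (cs.2.getD p.2 0 + 1)))
    (PySem.Dict.empty, PySem.Dict.empty)
  -- second loop of Source B: one pass over segments1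
  segments1.foldl (fun overlaps p =>
    overlaps + 2 * (counts.1.getD p.1 0 + counts.2.getD p.2 0)) 0

-- ===== PRECONDITION & SPEC =====
def Spec_calc_segment_overlaps (segments1 : List (Int × Int)) (segments2 : List (Int × Int)) (out : Int) : Prop := out = calc_segment_overlaps_alt segments1 segments2
instance (segments1 : List (Int × Int)) (segments2 : List (Int × Int)) (out : Int) : Decidable (Spec_calc_segment_overlaps segments1 segments2 out) := by unfold Spec_calc_segment_overlaps; infer_instance

-- ===== CLAIM (what is proved, stated in full; the proofs are below) =====
def Claim_equal_calc_segment_overlaps : Prop := ∀ (segments1 : List (Int × Int)) (segments2 : List (Int × Int)), Dom_calc_segment_overlaps segments1 segments2 → Spec_calc_segment_overlaps segments1 segments2 (calc_segment_overlaps segments1 segments2)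

-- ===== LEMMAS AND PROOFS =====

-- A's inner loop over segments2 adds 2 per matching first coordinate and 2 per matching second coordinate.
theorem inner_loop_eq (seg1 : Int × Int) (l : List (Int × Int)) (acc : Int) :
    l.foldl (fun overlaps seg2 =>
      if seg1.1 == seg2.1 && seg1.2 == seg2.2 then overlaps + 4
      else if seg1.1 == seg2.1 then overlaps + 2
      else if seg1.2 == seg2.2 then overlaps + 2
      else overlaps) acc
    = acc + 2 * (((l.map Prod.fst).count seg1.1 : Int) + ((l.map Prod.snd).count seg1.2 : Int)) := by
  induction l generalizing acc with
  | nil => simp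
  | cons p t ih =>
    simp only [List.foldl_cons, List.map_cons, List.count_cons, ih]
    by_cases h1 : seg1.1 = p.1 <;> by_cases h2 : seg1.2 = p.2 <;>
      simp [h1, h2] <;> (try split_ifs) <;> omega

-- the paired counter fold splits into two key-projected counter folds
theorem counts_fst (l : List (Int × Int)) (d e : PySem.Dict Int Int) :
    (l.foldl (fun (cs : PySem.Dict Int Int × PySem.Dict Int Int) p =>
      (cs.1.insert p.1 (cs.1.getD p.1 0 + 1), cs.2.insert p.2 (cs.2.getD p.2 0 + 1))) (d, e))
    = ((l.map Prod.fst).foldl (fun d x => d.insert x (d.getD x 0 + 1)) d,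
       (l.map Prod.snd).foldl (fun d x => d.insert x (d.getD x 0 + 1)) e) := by
  induction l generalizing d e with
  | nil => rfl
  | cons p t ih => simp [List.foldl_cons, ih]

theorem calc_segment_overlaps_eq (segments1 segments2 : List (Int × Int)) :
    calc_segment_overlaps segments1 segments2 = calc_segment_overlaps_alt segments1 segments2 := by
  unfold calc_segment_overlaps calc_segment_overlaps_alt
  rw [counts_fst]
  congr 1
  funext acc p
  rw [inner_loop_eq]
  simp [PySem.Dict.getD_foldl_insert_add_one]

-- ===== VERDICT (by name: the statement is the Claim_ definition above) =====
theorem calc_segment_overlaps_spec : Claim_equal_calc_segment_overlaps := by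
  intro s1 s2 _
  unfold Spec_calc_segment_overlaps
  exact calc_segment_overlaps_eq s1 s2
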